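-- pv_equiv track=rewrite | github.com/Elch123/paralleltranslation | torchalignedloss.py | nearest_insert_direction
-- ===== SOURCE A (Python) =====
-- def nearest_insert_direction(index,inserts):
--     #0 for left, 1 for right
--     left=index
--     right=index
--     while(True):
--         if(left>0):
--             left-=1
--             if(inserts[left]==1):
--                 return 0
--         else:
--             return 1
--         if(right<len(inserts)-1):
--             right+=1
--             if(inserts[right]==1):
--                 return 1
--         else:
--             return 0
-- ===== SOURCE B (Python) =====
-- def nearest_insert_direction(index, inserts):
--     # 0 for left, 1 for right
--     n = len(inserts)
--     if index <= 0:
--         return 1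
--     if index >= n:
--         return 0
--     lt, lv = index + 1, 1          # left boundary event (exhausted -> go right)
--     for j in range(index - 1, -1, -1):
--         if inserts[j] == 1:
--             lt, lv = index - j, 0
--             break
--     rt, rv = n - index, 0          # right boundary event (exhausted -> go left)
--     for j in range(index + 1, n):
--         if inserts[j] == 1:
--             rt, rv = j - index, 1
--             break
--     return lv if lt <= rt else rv
-- ===== Notes on version B (the rewrite author's own statement) =====
-- stated objective: alternative
-- what changed: A's single interleaved two-pointer loop is replaced by two independent directional scans (first 1 to the left, first 1 to the right) plus an arithmetic comparison of the two event distances, with immediate returns at the boundary cases index<=0 and index>=len.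
import Mathlib
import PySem

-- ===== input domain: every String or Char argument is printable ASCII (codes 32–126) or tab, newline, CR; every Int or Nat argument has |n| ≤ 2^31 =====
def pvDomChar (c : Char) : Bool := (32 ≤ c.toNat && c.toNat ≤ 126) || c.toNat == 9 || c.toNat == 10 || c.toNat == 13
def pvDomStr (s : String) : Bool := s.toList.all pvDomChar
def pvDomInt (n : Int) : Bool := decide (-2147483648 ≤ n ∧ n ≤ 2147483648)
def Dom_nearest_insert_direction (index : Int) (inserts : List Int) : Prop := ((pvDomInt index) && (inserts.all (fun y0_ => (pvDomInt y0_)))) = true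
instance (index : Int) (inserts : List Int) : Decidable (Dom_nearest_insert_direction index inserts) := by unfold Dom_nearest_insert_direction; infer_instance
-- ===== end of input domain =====

-- B replaces A's interleaved two-pointer loop by two independent directional scans plus an
-- arithmetic comparison of the two "event distances" (alternative decomposition, same cost).


-- ===== PORT A =====
-- A's while-True loop over the two pointers (left, right); inserts[left]/inserts[right] are
-- in range whenever this is reached under Pre_, so pyGetD is exact there.
def nearestLoopA (inserts : List Int) (left right : Int) : Int :=
  if h : left > 0 then
    if PySem.List.pyGetD inserts (left - 1) 0 == 1 then 0
    else if right < PySem.List.len inserts - 1 then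
      if PySem.List.pyGetD inserts (right + 1) 0 == 1 then 1
      else nearestLoopA inserts (left - 1) (right + 1)
    else 0
  else 1
termination_by left.toNat
decreasing_by omega

def nearest_insert_direction (index : Int) (inserts : List Int) : Int :=
  nearestLoopA inserts index index

-- ===== PORT B =====
def nearest_insert_direction_alt (index : Int) (inserts : List Int) : Int :=
  let n : Int := PySem.List.len inserts
  if index ≤ 0 then 1
  else if index ≥ n then 0
  else
    -- first 1 strictly left of index (loop with break = find?), else the left boundary event
    let le : Int × Int :=
      match (PySem.List.pyRange (index - 1) (-1) (-1)).find?
              (fun j => PySem.List.pyGetD inserts j 0 == 1) with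
      | some j => (index - j, 0)
      | none => (index + 1, 1)
    -- first 1 strictly right of index, else the right boundary event
    let re : Int × Int :=
      match (PySem.List.pyRange (index + 1) n 1).find?
              (fun j => PySem.List.pyGetD inserts j 0 == 1) with
      | some j => (j - index, 1)
      | none => (n - index, 0)
    if le.1 ≤ re.1 then le.2 else re.2

-- ===== PRECONDITION & SPEC =====
-- A raises IndexError exactly when index > len(inserts) (the left pointer steps outside the list).
def Pre_nearest_insert_direction (index : Int) (inserts : List Int) : Prop :=
  index ≤ PySem.List.len inserts
instance (index : Int) (inserts : List Int) : Decidable (Pre_nearest_insert_direction index inserts) := by unfold Pre_nearest_insert_direction; infer_instance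

def pvWitness_nearest_insert_direction : Int × List Int := (2, [1, 0, 0, 1])

def Spec_nearest_insert_direction (index : Int) (inserts : List Int) (out : Int) : Prop := out = nearest_insert_direction_alt index inserts
instance (index : Int) (inserts : List Int) (out : Int) : Decidable (Spec_nearest_insert_direction index inserts out) := by unfold Spec_nearest_insert_direction; infer_instance

-- ===== CLAIM (what is proved, stated in full; the proofs are below) =====
def Claim_equal_nearest_insert_direction : Prop := ∀ (index : Int) (inserts : List Int), Dom_nearest_insert_direction index inserts → Pre_nearest_insert_direction index inserts → Spec_nearest_insert_direction index inserts (nearest_insert_direction index inserts)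
-- ===== LEMMAS AND PROOFS =====

-- the two "event" pairs (distance, direction), relative to a position p
def eventL (inserts : List Int) (p : Int) : Int × Int :=
  match (PySem.List.pyRange (p - 1) (-1) (-1)).find?
          (fun j => PySem.List.pyGetD inserts j 0 == 1) with
  | some j => (p - j, 0)
  | none => (p + 1, 1)

def eventR (inserts : List Int) (p : Int) : Int × Int :=
  match (PySem.List.pyRange (p + 1) (PySem.List.len inserts) 1).find?
          (fun j => PySem.List.pyGetD inserts j 0 == 1) with
  | some j => (j - p, 1)
  | none => (max (PySem.List.len inserts - p) 1, 0)

lemma eventL_time_pos (inserts : List Int) (p : Int) (hp : 0 ≤ p) :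
    1 ≤ (eventL inserts p).1 := by
  unfold eventL
  cases hfind : (PySem.List.pyRange (p - 1) (-1) (-1)).find?
      (fun j => PySem.List.pyGetD inserts j 0 == 1) with
  | none => simp; omega
  | some j =>
      have hmem := List.mem_of_find?_eq_some hfind
      rw [PySem.List.mem_pyRange_neg_one] at hmem
      simp; omega

lemma eventR_time_pos (inserts : List Int) (p : Int) :
    1 ≤ (eventR inserts p).1 := by
  unfold eventR
  cases hfind : (PySem.List.pyRange (p + 1) (PySem.List.len inserts) 1).find?
      (fun j => PySem.List.pyGetD inserts j 0 == 1) with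
  | none => simp
  | some j =>
      have hmem := List.mem_of_find?_eq_some hfind
      rw [PySem.List.mem_pyRange_one] at hmem
      simp; omega

-- the loop of A computes the comparison of the two events
lemma nearestLoopA_eq_events (inserts : List Int) (l r : Int) (hl : 0 ≤ l) :
    nearestLoopA inserts l r =
      (if (eventL inserts l).1 ≤ (eventR inserts r).1
       then (eventL inserts l).2 else (eventR inserts r).2) := by
  have hlenEq : PySem.List.len inserts = (inserts.length : Int) := PySem.List.len_eq inserts
  by_cases hpos : l > 0
  · rw [nearestLoopA]
    simp only [hpos, dif_pos]
    have hLcons : PySem.List.pyRange (l - 1) (-1) (-1)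
        = (l - 1) :: PySem.List.pyRange (l - 2) (-1) (-1) := by
      have := PySem.List.pyRange_neg_one_cons (a := l - 1) (b := (-1)) (by omega)
      simpa [sub_sub] using this
    by_cases hL : PySem.List.pyGetD inserts (l - 1) 0 == 1
    · -- left finds a 1 immediately: event (1, 0), wins every tie
      simp only [hL, if_true]
      have hEL : eventL inserts l = (1, 0) := by
        unfold eventL
        rw [hLcons, List.find?_cons_of_pos (by simpa using hL)]
        simp
      rw [hEL]
      have := eventR_time_pos inserts r
      simp [this]
    · -- inserts[l-1] ≠ 1: eventL l is eventL (l-1) shifted by one step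
      have hshift : eventL inserts l = ((eventL inserts (l - 1)).1 + 1, (eventL inserts (l - 1)).2) := by
        unfold eventL
        rw [hLcons, List.find?_cons_of_neg (by simpa using hL)]
        rw [show l - 1 - 1 = l - 2 by ring]
        cases hf : (PySem.List.pyRange (l - 2) (-1) (-1)).find?
            (fun j => PySem.List.pyGetD inserts j 0 == 1) with
        | none => simp
        | some j => simp; ring
      have hlt2 : 2 ≤ (eventL inserts l).1 := by
        rw [hshift]
        have := eventL_time_pos inserts (l - 1) (by omega)
        simpa using by omega
      simp only [hL, if_false, Bool.false_eq_true]
      by_cases hr : r < PySem.List.len inserts - 1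
      · simp only [hr, if_true]
        have hRcons : PySem.List.pyRange (r + 1) (PySem.List.len inserts) 1
            = (r + 1) :: PySem.List.pyRange (r + 2) (PySem.List.len inserts) 1 := by
          have := PySem.List.pyRange_one_cons (a := r + 1) (b := PySem.List.len inserts) (by omega)
          simpa [add_assoc] using this
        by_cases hR : PySem.List.pyGetD inserts (r + 1) 0 == 1
        · -- right finds a 1 at distance 1; left distance is ≥ 2
          simp only [hR, if_true]
          have hER : eventR inserts r = (1, 1) := by
            unfold eventR
            rw [hRcons, List.find?_cons_of_pos (by simpa using hR)]
            simp
          rw [hER]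
          simp; omega
        · -- neither side fires: recurse, both events shift by one
          simp only [hR, if_false, Bool.false_eq_true]
          have hRshift : eventR inserts r = ((eventR inserts (r + 1)).1 + 1, (eventR inserts (r + 1)).2) := by
            unfold eventR
            rw [hRcons, List.find?_cons_of_neg (by simpa using hR)]
            rw [show r + 1 + 1 = r + 2 by ring]
            cases hf : (PySem.List.pyRange (r + 2) (PySem.List.len inserts) 1).find?
                (fun j => PySem.List.pyGetD inserts j 0 == 1) with
            | none => simp; omega
            | some j => simp; ring
          rw [nearestLoopA_eq_events inserts (l - 1) (r + 1) (by omega)]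
          rw [hshift, hRshift]
          simp only []
          by_cases hc : (eventL inserts (l - 1)).1 ≤ (eventR inserts (r + 1)).1
          · rw [if_pos hc, if_pos (by omega)]
          · rw [if_neg hc, if_neg (by omega)]
      · -- right boundary reached: return 0; right event has distance 1, left is ≥ 2
        simp only [hr, if_false]
        have hER : eventR inserts r = (1, 0) := by
          unfold eventR
          rw [PySem.List.pyRange_one_eq_nil (by omega)]
          simp
          omega
        rw [hER]
        simp; omega
  · -- left pointer exhausted: return 1; left event is (l+1, 1) with l = 0
    rw [nearestLoopA]
    simp only [hpos]
    have hl0 : l = 0 := by omega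
    subst hl0
    have hEL : eventL inserts 0 = (1, 1) := by
      unfold eventL
      rw [PySem.List.pyRange_neg_one_eq_nil (by omega)]
      simp
    rw [hEL]
    have := eventR_time_pos inserts r
    simp [this]
termination_by l.toNat
decreasing_by omega

-- ===== VERDICT (by name: the statement is the Claim_ definition above) =====
theorem nearest_insert_direction_spec : Claim_equal_nearest_insert_direction := by
  intro index inserts _hdom hpre
  unfold Spec_nearest_insert_direction Pre_nearest_insert_direction at *
  have hlen : PySem.List.len inserts = (inserts.length : Int) := PySem.List.len_eq inserts
  unfold nearest_insert_direction
  by_cases h0 : index ≤ 0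
  · rw [nearestLoopA]
    simp [nearest_insert_direction_alt, h0, show ¬ index > 0 by omega]
  · by_cases hn : index ≥ PySem.List.len inserts
    · -- index = len(inserts): A checks inserts[len-1] and returns 0 either way; B returns 0
      rw [nearestLoopA]
      rw [dif_pos (show index > 0 by omega)]
      simp only [nearest_insert_direction_alt, if_neg h0, if_pos hn]
      split_ifs <;> first | rfl | (exfalso; omega)
    · -- interior index: both sides are the comparison of the two events
      rw [nearestLoopA_eq_events inserts index index (by omega)]
      simp only [nearest_insert_direction_alt, if_neg h0, if_neg hn]
      have hmax : max (PySem.List.len inserts - index) 1 = PySem.List.len inserts - index := by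
        omega
      simp only [eventL, eventR, hmax]
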